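-- pv_equiv track=rewrite | github.com/541741106/IMPACT_HOI | core/models.py | frames_to_runs
-- ===== SOURCE A (Python) =====
-- from typing import Dict, List, Optional, Tuple, Union
--
-- def frames_to_runs(frames: List[int]) -> List[Tuple[int, int]]:
--     """sorted frames -> contiguous [start,end] (inclusive)"""
--     if not frames:
--         return []
--     runs = []
--     s = e = frames[0]
--     for f in frames[1:]:
--         if f == e + 1:
--             e = f
--         else:
--             runs.append((s, e))
--             s = e = f
--     runs.append((s, e))
--     return runs
-- ===== SOURCE B (Python) =====
-- from typing import Dict, List, Optional, Tuple, Union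
--
-- def frames_to_runs(frames: List[int]) -> List[Tuple[int, int]]:
--     """sorted frames -> contiguous [start,end] (inclusive)"""
--     rev: List[Tuple[int, int]] = []
--     for f in reversed(frames):
--         if rev and rev[-1][0] == f + 1:
--             rev[-1] = (f, rev[-1][1])
--         else:
--             rev.append((f, f))
--     rev.reverse()
--     return rev
-- ===== Notes on version B (the rewrite author's own statement) =====
-- stated objective: alternative
-- what changed: B builds the run list back-to-front: it scans the frames in reverse, extending or starting the most recent run, and reverses the collected runs at the end, instead of A's forward start/end state machine with a trailing flush append.
import Mathlib
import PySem

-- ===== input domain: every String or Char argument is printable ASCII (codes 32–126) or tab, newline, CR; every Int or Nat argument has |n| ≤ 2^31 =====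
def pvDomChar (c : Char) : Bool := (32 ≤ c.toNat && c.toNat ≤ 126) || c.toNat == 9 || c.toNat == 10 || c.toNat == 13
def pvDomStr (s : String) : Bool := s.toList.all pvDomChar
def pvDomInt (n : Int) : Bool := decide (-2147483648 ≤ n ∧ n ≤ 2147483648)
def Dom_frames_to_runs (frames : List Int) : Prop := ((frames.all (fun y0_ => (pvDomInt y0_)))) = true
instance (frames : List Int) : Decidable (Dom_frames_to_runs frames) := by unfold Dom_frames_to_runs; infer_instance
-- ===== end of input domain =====

-- B builds the run list back-to-front (scan the reversed frames, extend or start the most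
-- recent run, reverse at the end) instead of A's forward start/end state machine; same cost,
-- no speed claim.

-- ===== PORT A =====
-- A: if empty return []; else fold over frames[1:] with state (runs, s, e); flush (s, e) at the end.
def frames_to_runs (frames : List Int) : List (Int × Int) :=
  match frames with
  | [] => []
  | f0 :: rest =>
    let st := rest.foldl
      (fun (acc : List (Int × Int) × Int × Int) f =>
        let (runs, s, e) := acc
        if f = e + 1 then (runs, s, f) else (runs ++ [(s, e)], f, f))
      ([], f0, f0)
    st.1 ++ [(st.2.1, st.2.2)]

-- ===== PORT B =====
-- B: for f in reversed(frames): extend the last collected run if its start is f+1, else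
-- append (f, f); finally reverse the collected runs.
def pvBStep (rev : List (Int × Int)) (f : Int) : List (Int × Int) :=
  match rev.getLast? with
  | some (s, e) => if s = f + 1 then rev.dropLast ++ [(f, e)] else rev ++ [(f, f)]
  | none => [(f, f)]

def frames_to_runs_alt (frames : List Int) : List (Int × Int) :=
  (frames.reverse.foldl pvBStep []).reverse

-- ===== PRECONDITION & SPEC =====
def Spec_frames_to_runs (frames : List Int) (out : List (Int × Int)) : Prop := out = frames_to_runs_alt frames
instance (frames : List Int) (out : List (Int × Int)) : Decidable (Spec_frames_to_runs frames out) := by unfold Spec_frames_to_runs; infer_instance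

-- ===== CLAIM (what is proved, stated in full; the proofs are below) =====
def Claim_equal_frames_to_runs : Prop := ∀ (frames : List Int), Dom_frames_to_runs frames → Spec_frames_to_runs frames (frames_to_runs frames)

-- ===== LEMMAS AND PROOFS =====

-- canonical form: `aux e l = (e', runs)` — the current run (started somewhere, currently ending
-- at e) ends at e', followed by the runs of the remainder.
def pvAux : Int → List Int → Int × List (Int × Int)
  | e, [] => (e, [])
  | e, f :: l => if f = e + 1 then pvAux f l else (e, (f, (pvAux f l).1) :: (pvAux f l).2)

theorem pvA_aux (rest : List Int) : ∀ (runs : List (Int × Int)) (s e : Int),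
    (let st := rest.foldl
      (fun (acc : List (Int × Int) × Int × Int) f =>
        let (runs, s, e) := acc
        if f = e + 1 then (runs, s, f) else (runs ++ [(s, e)], f, f))
      (runs, s, e)
     st.1 ++ [(st.2.1, st.2.2)])
    = runs ++ (s, (pvAux e rest).1) :: (pvAux e rest).2 := by
  induction rest with
  | nil => intro runs s e; simp [pvAux]
  | cons f l ih =>
    intro runs s e
    by_cases h : f = e + 1
    · simpa [pvAux, h] using ih runs s f
    · simpa [pvAux, h] using ih (runs ++ [(s, e)]) f f

-- the front-prepend mirror of pvBStep (B's step seen on the reversed accumulator)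
def pvStep' (f : Int) (runs : List (Int × Int)) : List (Int × Int) :=
  match runs with
  | (s, e) :: rest => if s = f + 1 then (f, e) :: rest else (f, f) :: (s, e) :: rest
  | [] => [(f, f)]

theorem pvBStep_reverse (f : Int) (r : List (Int × Int)) :
    (pvBStep r.reverse f).reverse = pvStep' f r := by
  cases r with
  | nil => rfl
  | cons p t =>
    obtain ⟨s, e⟩ := p
    simp only [pvBStep, pvStep', List.reverse_cons, List.getLast?_concat,
      List.dropLast_concat]
    by_cases h : s = f + 1 <;> simp [h]

theorem pvAlt_foldr (l : List Int) : frames_to_runs_alt l = l.foldr pvStep' [] := by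
  unfold frames_to_runs_alt
  rw [List.foldl_reverse]
  induction l with
  | nil => rfl
  | cons f t ih =>
    simp only [List.foldr_cons]
    rw [← pvBStep_reverse f (t.foldr pvStep' []), ← ih, List.reverse_reverse]

theorem pvB_aux (l : List Int) :
    l.foldr pvStep' []
    = match l with
      | [] => []
      | f :: rest => (f, (pvAux f rest).1) :: (pvAux f rest).2 := by
  induction l with
  | nil => rfl
  | cons f rest ih =>
    cases rest with
    | nil => rfl
    | cons g rest' =>
      simp only [List.foldr_cons] at ih ⊢
      rw [ih]
      by_cases h : g = f + 1 <;> simp [pvStep', pvAux, h]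

-- ===== VERDICT (by name: the statement is the Claim_ definition above) =====
theorem frames_to_runs_spec : Claim_equal_frames_to_runs := by
  intro frames _
  unfold Spec_frames_to_runs
  rw [pvAlt_foldr, pvB_aux]
  cases frames with
  | nil => rfl
  | cons f0 rest => simpa [frames_to_runs] using pvA_aux rest [] f0 f0
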